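-- pv_equiv track=rewrite | github.com/ANANDHANAADHI/6comapanies30days-challenge | GoldmanSacha/2212. Maximum Points in an Archery Competition.py | maximumBobPoints
-- ===== SOURCE A (Python) =====
-- from typing import List
--
-- def maximumBobPoints(numArrows: int, aliceArrows: List[int]) -> List[int]:
--   ##
--   def dp(st,arr):
--     if st == 12 or arr == 0:
--       return 0
--     mS = dp(st+1,arr)
--     if aliceArrows[st] < arr:
--       return max(mS,dp(st+1,arr-aliceArrows[st]-1) + st)
--     else:
--       return mS
--   ##
--   ans = [0]*12
--   remarr = numArrows
--   for ii in range(12):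
--     if dp(ii+1,remarr) < dp(ii,remarr):
--       ans[ii] = aliceArrows[ii] + 1
--       remarr -= aliceArrows[ii] + 1
--   ans[0] += remarr
--   return ans
-- ===== SOURCE B (Python) =====
-- from typing import List
--
-- def maximumBobPoints(numArrows: int, aliceArrows: List[int]) -> List[int]:
--     # Enumerate all 2^(12-st) subsets of the suffix sections st..11 as bitmasks
--     # (section i <-> bit 11-i) instead of A's exponential branching recursion.
--     # A chosen section is takeable only while arrows remain (!= 0) and the count
--     # beats Alice's, checked left to right over the mask.
--     def suffix_best(st, arr):
--         best = 0
--         for m in range(1 << (12 - st)):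
--             rem = arr
--             score = 0
--             ok = True
--             for i in range(st, 12):
--                 if (m >> (11 - i)) & 1:
--                     if rem == 0 or aliceArrows[i] >= rem:
--                         ok = False
--                         break
--                     rem -= aliceArrows[i] + 1
--                     score += i
--             if ok and score > best:
--                 best = score
--         return best
--     ans = [0] * 12
--     remarr = numArrows
--     for ii in range(12):
--         if suffix_best(ii + 1, remarr) < suffix_best(ii, remarr):
--             ans[ii] = aliceArrows[ii] + 1
--             remarr -= aliceArrows[ii] + 1
--     ans[0] += remarr
--     return ans
-- ===== Notes on version B (the rewrite author's own statement) =====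
-- stated objective: alternative
-- what changed: A's exponential branching recursion dp(st,arr) is replaced by a direct iterative enumeration of all 2^(12-st) suffix-section bitmasks, each checked left-to-right for sequential takeability (arrows remaining and count beating Alice's) with a running strict max; the strict-improvement reconstruction is kept; Pre_ excludes only the inputs where both programs raise IndexError (numArrows != 0 with fewer than 12 sections).
import Mathlib
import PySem

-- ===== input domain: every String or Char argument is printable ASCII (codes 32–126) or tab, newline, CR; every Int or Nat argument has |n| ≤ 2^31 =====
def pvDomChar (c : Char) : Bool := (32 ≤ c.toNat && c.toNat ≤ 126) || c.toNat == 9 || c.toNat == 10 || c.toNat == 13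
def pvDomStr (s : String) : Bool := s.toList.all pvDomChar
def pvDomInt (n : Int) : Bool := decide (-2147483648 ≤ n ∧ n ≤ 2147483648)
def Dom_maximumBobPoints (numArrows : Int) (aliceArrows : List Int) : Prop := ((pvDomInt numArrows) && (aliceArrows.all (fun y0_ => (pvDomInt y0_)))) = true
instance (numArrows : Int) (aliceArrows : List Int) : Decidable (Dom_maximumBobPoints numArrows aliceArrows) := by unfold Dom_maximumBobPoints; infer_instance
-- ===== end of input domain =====

-- B replaces A's exponential branching recursion dp(st,arr) by a direct iterative
-- enumeration of suffix-section bitmasks with a sequential takeability check.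

-- ===== PORT A =====
-- aliceArrows[st] (in range on every input Pre_ admits where it is evaluated)
def pyAtA (aA : List Int) (i : Nat) : Int := (PySem.List.pyGet? aA ((i : Nat) : Int)).getD 0

-- dp(st, arr); the extra first argument is fuel (recursion depth bound, 13 suffices
-- for st ∈ [0,12]) making the Python recursion structurally terminating; it is
-- never exhausted on the calls the program makes.
def dpA (aA : List Int) : Nat → Nat → Int → Int
  | 0, _, _ => 0
  | fuel+1, st, arr =>
    if st == 12 || arr == 0 then 0
    else
      let mS := dpA aA fuel (st+1) arr
      if pyAtA aA st < arr then max mS (dpA aA fuel (st+1) (arr - pyAtA aA st - 1) + (st : Int))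
      else mS

def maximumBobPoints (numArrows : Int) (aliceArrows : List Int) : List Int :=
  let s := (List.range 12).foldl
    (fun (s : List Int × Int) ii =>
      if dpA aliceArrows 13 (ii+1) s.2 < dpA aliceArrows 13 ii s.2 then
        (s.1.set ii (pyAtA aliceArrows ii + 1), s.2 - (pyAtA aliceArrows ii + 1))
      else s)
    (List.replicate 12 0, numArrows)
  s.1.set 0 ((PySem.List.pyGet? s.1 0).getD 0 + s.2)

-- ===== PORT B =====
-- aliceArrows[i] (in range on every input Pre_ admits where it is evaluated)
def pyAtB (aA : List Int) (i : Nat) : Int := (PySem.List.pyGet? aA ((i : Nat) : Int)).getD 0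

-- the inner loop of suffix_best on mask m (section i <-> bit 11-i): state is
-- (ok, rem, score); Python's `break` is rendered by freezing the state once ok
-- is false (no later iteration changes it)
def simMask (aA : List Int) (arr : Int) (st : Nat) (m : Nat) : Bool × Int × Int :=
  (List.range' st (12 - st)).foldl
    (fun s i =>
      if s.1 && ((m >>> (11 - i)) &&& 1 == 1) then
        if s.2.1 = 0 ∨ s.2.1 ≤ pyAtB aA i then (false, s.2.1, s.2.2)
        else (true, s.2.1 - (pyAtB aA i + 1), s.2.2 + (i : Int))
      else s)
    (true, arr, 0)

-- suffix_best(st, arr): running strict max over all masks m < 2^(12-st)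
def suffixBest (aA : List Int) (st : Nat) (arr : Int) : Int :=
  (List.range (2 ^ (12 - st))).foldl
    (fun best m =>
      if (simMask aA arr st m).1 = true ∧ best < (simMask aA arr st m).2.2 then
        (simMask aA arr st m).2.2
      else best)
    0

def maximumBobPoints_alt (numArrows : Int) (aliceArrows : List Int) : List Int :=
  let s := (List.range 12).foldl
    (fun (s : List Int × Int) ii =>
      if suffixBest aliceArrows (ii+1) s.2 < suffixBest aliceArrows ii s.2 then
        (s.1.set ii (pyAtB aliceArrows ii + 1), s.2 - (pyAtB aliceArrows ii + 1))
      else s)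
    (List.replicate 12 0, numArrows)
  s.1.set 0 ((PySem.List.pyGet? s.1 0).getD 0 + s.2)

-- ===== PRECONDITION & SPEC =====
-- Pre_ is exactly the set of inputs on which the Python A returns: with
-- numArrows ≠ 0 both programs index sections 0..11 and raise IndexError on a
-- list shorter than 12; with numArrows = 0 neither touches the list.
def Pre_maximumBobPoints (numArrows : Int) (aliceArrows : List Int) : Prop :=
  numArrows = 0 ∨ 12 ≤ aliceArrows.length
instance (numArrows : Int) (aliceArrows : List Int) : Decidable (Pre_maximumBobPoints numArrows aliceArrows) := by unfold Pre_maximumBobPoints; infer_instance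

def pvWitness_maximumBobPoints : Int × List Int := (7, [1, 0, 2, 0, 1, 3, 0, 0, 2, 1, 0, 4])

def Spec_maximumBobPoints (numArrows : Int) (aliceArrows : List Int) (out : List Int) : Prop := out = maximumBobPoints_alt numArrows aliceArrows
instance (numArrows : Int) (aliceArrows : List Int) (out : List Int) : Decidable (Spec_maximumBobPoints numArrows aliceArrows out) := by unfold Spec_maximumBobPoints; infer_instance

-- ===== CLAIM (what is proved, stated in full; the proofs are below) =====
def Claim_equal_maximumBobPoints : Prop := ∀ (numArrows : Int) (aliceArrows : List Int), Dom_maximumBobPoints numArrows aliceArrows → Pre_maximumBobPoints numArrows aliceArrows → Spec_maximumBobPoints numArrows aliceArrows (maximumBobPoints numArrows aliceArrows)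

-- ===== LEMMAS AND PROOFS =====

-- max-fold with a feasibility predicate: the shape both phases of suffixBest reduce to
def Tm (P : Nat → Prop) [DecidablePred P] (f : Nat → Int) (b : Int) (l : List Nat) : Int :=
  l.foldl (fun best m => if P m then max best (f m) else best) b

theorem Tm_cons (P : Nat → Prop) [DecidablePred P] (f : Nat → Int) (b : Int) (m : Nat) (l : List Nat) :
    Tm P f b (m :: l) = Tm P f (if P m then max b (f m) else b) l := rfl

-- the strict-update running max equals the max-fold
theorem fold_strict_eq_Tm (P : Nat → Prop) [DecidablePred P] (f : Nat → Int) (l : List Nat) :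
    ∀ b : Int, l.foldl (fun best m => if P m ∧ best < f m then f m else best) b = Tm P f b l := by
  induction l with
  | nil => intro b; rfl
  | cons m l ih =>
    intro b
    rw [List.foldl_cons, Tm_cons]
    rw [show (if P m ∧ b < f m then f m else b) = (if P m then max b (f m) else b) by
      by_cases h : P m <;> simp [h, Int.max_def] <;> omega]
    exact ih _

theorem Tm_id (P : Nat → Prop) [DecidablePred P] (f : Nat → Int) (l : List Nat)
    (h : ∀ m ∈ l, ¬ P m) : ∀ b, Tm P f b l = b := by
  induction l with
  | nil => intro b; rfl
  | cons m l ih =>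
    intro b
    rw [Tm_cons, if_neg (h m List.mem_cons_self)]
    exact ih (fun x hx => h x (List.mem_cons_of_mem _ hx)) b

theorem Tm_congr (P Q : Nat → Prop) [DecidablePred P] [DecidablePred Q] (f g : Nat → Int)
    (l : List Nat) (h : ∀ m ∈ l, (P m ↔ Q m) ∧ f m = g m) : ∀ b, Tm P f b l = Tm Q g b l := by
  induction l with
  | nil => intro b; rfl
  | cons m l ih =>
    intro b
    have hm := h m List.mem_cons_self
    rw [Tm_cons, Tm_cons]
    have he : (if P m then max b (f m) else b) = (if Q m then max b (g m) else b) := by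
      by_cases hp : P m
      · rw [if_pos hp, if_pos (hm.1.mp hp), hm.2]
      · rw [if_neg hp, if_neg (fun hq => hp (hm.1.mpr hq))]
    rw [he]
    exact ih (fun x hx => h x (List.mem_cons_of_mem _ hx)) _

theorem Tm_off (P : Nat → Prop) [DecidablePred P] (f : Nat → Int) (o : Int) (l : List Nat) :
    ∀ b, Tm P (fun m => o + f m) b l = Tm P f (b - o) l + o := by
  induction l with
  | nil => intro b; simp only [Tm, List.foldl_nil]; omega
  | cons m l ih =>
    intro b
    rw [Tm_cons, Tm_cons, ih]
    congr 2
    by_cases hp : P m <;> simp [hp, Int.max_def] <;> omega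

theorem Tm_init0 (P : Nat → Prop) [DecidablePred P] (f : Nat → Int) (l : List Nat)
    (hf : ∀ m ∈ l, 0 ≤ f m) (hex : ∃ m ∈ l, P m) : ∀ b, Tm P f b l = max b (Tm P f 0 l) := by
  induction l with
  | nil => rcases hex with ⟨m, hm, _⟩; exact absurd hm (List.not_mem_nil)
  | cons m l ih =>
    intro b
    have hfm : ∀ x ∈ l, 0 ≤ f x := fun x hx => hf x (List.mem_cons_of_mem _ hx)
    by_cases hp : P m
    · rw [Tm_cons, Tm_cons, if_pos hp, if_pos hp]
      have h0 : max 0 (f m) = f m := by have := hf m List.mem_cons_self; omega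
      rw [h0]
      by_cases hex2 : ∃ x ∈ l, P x
      · rw [ih hfm hex2 (max b (f m)), ih hfm hex2 (f m)]
        omega
      · have hid := Tm_id P f l (by push_neg at hex2; exact hex2)
        rw [hid, hid]
    · rw [Tm_cons, Tm_cons, if_neg hp, if_neg hp]
      rcases hex with ⟨x, hx, hPx⟩
      rcases List.mem_cons.mp hx with rfl | hx2
      · exact absurd hPx hp
      · exact ih hfm ⟨x, hx2, hPx⟩ b

theorem Tm_map (P : Nat → Prop) [DecidablePred P] (f : Nat → Int) (g : Nat → Nat)
    (l : List Nat) (b : Int) :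
    Tm P f b (l.map g) = Tm (fun m => P (g m)) (fun m => f (g m)) b l := by
  simp [Tm, List.foldl_map]

-- simMask facts ----------------------------------------------------------

-- the per-element step of simMask, abstracted over the bit test
def simStep (aA : List Int) (bit : Nat → Bool) (s : Bool × Int × Int) (i : Nat) : Bool × Int × Int :=
  if s.1 && bit i then
    if s.2.1 = 0 ∨ s.2.1 ≤ pyAtB aA i then (false, s.2.1, s.2.2)
    else (true, s.2.1 - (pyAtB aA i + 1), s.2.2 + (i : Int))
  else s

theorem simMask_eq_fold (aA : List Int) (arr : Int) (st : Nat) (m : Nat) :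
    simMask aA arr st m =
      (List.range' st (12 - st)).foldl (simStep aA (fun i => (m >>> (11 - i)) &&& 1 == 1)) (true, arr, 0) := rfl

theorem fold_simStep_zero (aA : List Int) (l : List Nat) :
    ∀ s, l.foldl (simStep aA (fun i => (0 >>> (11 - i)) &&& 1 == 1)) s = s := by
  induction l with
  | nil => intro s; rfl
  | cons i l ih =>
    intro s
    rw [List.foldl_cons, show simStep aA (fun i => (0 >>> (11 - i)) &&& 1 == 1) s i = s by
      simp [simStep, Nat.zero_shiftRight]]
    exact ih s

theorem simMask_zero (aA : List Int) (arr : Int) (st : Nat) : simMask aA arr st 0 = (true, arr, 0) := by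
  rw [simMask_eq_fold]; exact fold_simStep_zero aA _ _

theorem fold_simStep_false (aA : List Int) (bit : Nat → Bool) (l : List Nat) :
    ∀ r sc, l.foldl (simStep aA bit) (false, r, sc) = (false, r, sc) := by
  induction l with
  | nil => intro r sc; rfl
  | cons i l ih =>
    intro r sc
    rw [List.foldl_cons, show simStep aA bit (false, r, sc) i = (false, r, sc) by simp [simStep]]
    exact ih r sc

theorem fold_simStep_score_mono (aA : List Int) (bit : Nat → Bool) (l : List Nat) :
    ∀ s : Bool × Int × Int, s.2.2 ≤ (l.foldl (simStep aA bit) s).2.2 := by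
  induction l with
  | nil => intro s; exact le_refl _
  | cons i l ih =>
    intro s
    rw [List.foldl_cons]
    refine le_trans ?_ (ih (simStep aA bit s i))
    unfold simStep
    by_cases h1 : s.1 && bit i
    · rw [if_pos h1]
      by_cases h2 : s.2.1 = 0 ∨ s.2.1 ≤ pyAtB aA i
      · rw [if_pos h2]
      · rw [if_neg h2]; dsimp only; omega
    · rw [if_neg h1]

theorem simMask_score_nonneg (aA : List Int) (arr : Int) (st : Nat) (m : Nat) :
    0 ≤ (simMask aA arr st m).2.2 := by
  rw [simMask_eq_fold]
  exact fold_simStep_score_mono aA _ _ (true, arr, 0)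

theorem fold_simStep_congr (aA : List Int) (bit1 bit2 : Nat → Bool) (l : List Nat)
    (h : ∀ i ∈ l, bit1 i = bit2 i) :
    ∀ s, l.foldl (simStep aA bit1) s = l.foldl (simStep aA bit2) s := by
  induction l with
  | nil => intro s; rfl
  | cons i l ih =>
    intro s
    rw [List.foldl_cons, List.foldl_cons,
        show simStep aA bit1 s i = simStep aA bit2 s i by unfold simStep; rw [h i List.mem_cons_self]]
    exact ih (fun x hx => h x (List.mem_cons_of_mem _ hx)) _

-- the running score is an additive offset: ok and rem evolve independently of it
theorem fold_simStep_offset (aA : List Int) (bit : Nat → Bool) (l : List Nat) :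
    ∀ (ok : Bool) (r sc off : Int),
      l.foldl (simStep aA bit) (ok, r, sc + off) =
        ((l.foldl (simStep aA bit) (ok, r, sc)).1,
         (l.foldl (simStep aA bit) (ok, r, sc)).2.1,
         (l.foldl (simStep aA bit) (ok, r, sc)).2.2 + off) := by
  induction l with
  | nil => intro ok r sc off; rfl
  | cons i l ih =>
    intro ok r sc off
    rw [List.foldl_cons, List.foldl_cons]
    unfold simStep
    by_cases h1 : ok && bit i
    · rw [if_pos h1, if_pos h1]
      by_cases h2 : r = 0 ∨ r ≤ pyAtB aA i
      · rw [if_pos h2, if_pos h2]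
        exact ih false r sc off
      · rw [if_neg h2, if_neg h2]
        dsimp only
        rw [show sc + off + (i : Int) = (sc + (i : Int)) + off by ring]
        exact ih true (r - (pyAtB aA i + 1)) (sc + (i : Int)) off
    · rw [if_neg h1, if_neg h1]
      exact ih ok r sc off

-- bit of 2^k + m at position s < k equals bit of m (m < 2^k)
theorem bit_add_pow (k s m : Nat) (hs : s < k) (hm : m < 2 ^ k) :
    ((2 ^ k + m) >>> s) &&& 1 = (m >>> s) &&& 1 := by
  rw [Nat.shiftRight_eq_div_pow, Nat.shiftRight_eq_div_pow, Nat.and_one_is_mod, Nat.and_one_is_mod]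
  have hdiv : (2 ^ k + m) / 2 ^ s = 2 ^ (k - s) + m / 2 ^ s := by
    have h1 : 2 ^ k = 2 ^ (k - s) * 2 ^ s := by
      rw [← pow_add]; congr 1; omega
    rw [h1, Nat.mul_comm (2 ^ (k - s)) (2 ^ s), Nat.mul_add_div (Nat.pow_pos (by norm_num : (0:Nat) < 2))]
  rw [hdiv]
  have h2 : 2 ^ (k - s) = 2 * 2 ^ (k - s - 1) := by
    rw [← pow_succ']; congr 1; omega
  rw [h2, Nat.mul_comm 2 (2 ^ (k - s - 1))]
  omega

-- top bit of 2^k + m (m < 2^k) is 1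
theorem bit_top (k m : Nat) (hm : m < 2 ^ k) : ((2 ^ k + m) >>> k) &&& 1 = 1 := by
  rw [Nat.shiftRight_eq_div_pow, Nat.and_one_is_mod]
  have : (2 ^ k + m) / 2 ^ k = 1 := by
    rw [Nat.add_comm, Nat.add_div_right _ (Nat.pow_pos (by norm_num : (0:Nat) < 2)),
        Nat.div_eq_of_lt hm]
  rw [this]

theorem simMask_low (aA : List Int) (arr : Int) (st : Nat) (m : Nat) (hst : st ≤ 11)
    (hm : m < 2 ^ (11 - st)) : simMask aA arr st m = simMask aA arr (st + 1) m := by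
  rw [simMask_eq_fold, simMask_eq_fold]
  have hr : List.range' st (12 - st) = st :: List.range' (st + 1) (11 - st) := by
    rw [show 12 - st = (11 - st) + 1 by omega, List.range'_succ]
  rw [hr, List.foldl_cons]
  rw [show simStep aA (fun i => (m >>> (11 - i)) &&& 1 == 1) (true, arr, 0) st = (true, arr, 0) by
    unfold simStep; simp [Nat.shiftRight_eq_div_pow, Nat.div_eq_of_lt hm]]
  rw [show (12 : Nat) - (st + 1) = 11 - st by omega]

-- mask with the top bit set, blocked first section: the whole mask is invalid
theorem simMask_high_bad (aA : List Int) (arr : Int) (st : Nat) (m : Nat) (hst : st ≤ 11)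
    (hm : m < 2 ^ (11 - st)) (hbad : arr = 0 ∨ arr ≤ pyAtB aA st) :
    simMask aA arr st (2 ^ (11 - st) + m) = (false, arr, 0) := by
  rw [simMask_eq_fold]
  have hr : List.range' st (12 - st) = st :: List.range' (st + 1) (11 - st) := by
    rw [show 12 - st = (11 - st) + 1 by omega, List.range'_succ]
  rw [hr, List.foldl_cons]
  rw [show simStep aA (fun i => ((2 ^ (11 - st) + m) >>> (11 - i)) &&& 1 == 1) (true, arr, 0) st
        = (false, arr, 0) by
    unfold simStep; simp [bit_top (11 - st) m hm, hbad]]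
  exact fold_simStep_false aA _ _ arr 0

-- mask with the top bit set, first section takeable: simulate the rest with the
-- reduced budget; the score is offset by st
theorem simMask_high_good (aA : List Int) (arr : Int) (st : Nat) (m : Nat) (hst : st ≤ 11)
    (hm : m < 2 ^ (11 - st)) (hne : ¬ (arr = 0 ∨ arr ≤ pyAtB aA st)) :
    simMask aA arr st (2 ^ (11 - st) + m) =
      ((simMask aA (arr - (pyAtB aA st + 1)) (st + 1) m).1,
       (simMask aA (arr - (pyAtB aA st + 1)) (st + 1) m).2.1,
       (simMask aA (arr - (pyAtB aA st + 1)) (st + 1) m).2.2 + (st : Int)) := by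
  rw [simMask_eq_fold, simMask_eq_fold]
  have hr : List.range' st (12 - st) = st :: List.range' (st + 1) (11 - st) := by
    rw [show 12 - st = (11 - st) + 1 by omega, List.range'_succ]
  rw [hr, List.foldl_cons]
  rw [show simStep aA (fun i => ((2 ^ (11 - st) + m) >>> (11 - i)) &&& 1 == 1) (true, arr, 0) st
        = (true, arr - (pyAtB aA st + 1), (st : Int)) by
    unfold simStep; simp [bit_top (11 - st) m hm, hne]]
  rw [fold_simStep_congr aA _ (fun i => (m >>> (11 - i)) &&& 1 == 1) _
    (fun i hi => by
      have hmem := List.mem_range'_1.mp hi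
      rw [bit_add_pow (11 - st) (11 - i) m (by omega) hm])]
  rw [show (st : Int) = 0 + (st : Int) by omega, fold_simStep_offset,
      show (12 : Nat) - (st + 1) = 11 - st by omega]
  norm_num

-- suffixBest as a max-fold
theorem suffixBest_eq_Tm (aA : List Int) (st : Nat) (arr : Int) :
    suffixBest aA st arr =
      Tm (fun m => (simMask aA arr st m).1 = true) (fun m => (simMask aA arr st m).2.2) 0
        (List.range (2 ^ (12 - st))) := by
  unfold suffixBest
  exact fold_strict_eq_Tm _ _ _ 0

theorem suffixBest_twelve (aA : List Int) (arr : Int) : suffixBest aA 12 arr = 0 := by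
  rw [suffixBest_eq_Tm]
  norm_num [Tm, List.range_succ, show simMask aA arr 12 0 = (true, arr, 0) from simMask_zero aA arr 12]

-- peel the top bit: suffixBest st = fold of the high-bit masks over suffixBest (st+1)
theorem suffixBest_split (aA : List Int) (st : Nat) (arr : Int) (hst : st ≤ 11) :
    suffixBest aA st arr =
      Tm (fun m => (simMask aA arr st m).1 = true) (fun m => (simMask aA arr st m).2.2)
        (suffixBest aA (st + 1) arr)
        ((List.range (2 ^ (11 - st))).map (fun m => 2 ^ (11 - st) + m)) := by
  rw [suffixBest_eq_Tm]
  have h1 : (12 - st) = (11 - st) + 1 := by omega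
  have h2 : 2 ^ ((11 - st) + 1) = 2 ^ (11 - st) + 2 ^ (11 - st) := by rw [pow_succ]; omega
  rw [h1, h2, List.range_add]
  have happ : ∀ (l1 l2 : List Nat) (b : Int),
      Tm (fun m => (simMask aA arr st m).1 = true) (fun m => (simMask aA arr st m).2.2) b (l1 ++ l2)
        = Tm (fun m => (simMask aA arr st m).1 = true) (fun m => (simMask aA arr st m).2.2)
            (Tm (fun m => (simMask aA arr st m).1 = true) (fun m => (simMask aA arr st m).2.2) b l1) l2 := by
    intro l1 l2 b; simp [Tm, List.foldl_append]
  rw [happ]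
  have hfirst : Tm (fun m => (simMask aA arr st m).1 = true) (fun m => (simMask aA arr st m).2.2) 0
      (List.range (2 ^ (11 - st))) = suffixBest aA (st + 1) arr := by
    rw [suffixBest_eq_Tm, show 12 - (st + 1) = 11 - st by omega]
    refine Tm_congr _ _ _ _ _ (fun m hm => ?_) 0
    rw [simMask_low aA arr st m hst (List.mem_range.mp hm)]
    exact ⟨Iff.rfl, rfl⟩
  rw [hfirst]

-- the recurrence, skip case: section st cannot be taken
theorem suffixBest_skip (aA : List Int) (st : Nat) (arr : Int) (hst : st ≤ 11)
    (hbad : arr = 0 ∨ arr ≤ pyAtB aA st) :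
    suffixBest aA st arr = suffixBest aA (st + 1) arr := by
  rw [suffixBest_split aA st arr hst]
  refine Tm_id _ _ _ (fun m hm => ?_) _
  rcases List.mem_map.mp hm with ⟨m', hm', rfl⟩
  rw [simMask_high_bad aA arr st m' hst (List.mem_range.mp hm') hbad]
  simp

-- the recurrence, take case: section st can be taken
theorem suffixBest_take (aA : List Int) (st : Nat) (arr : Int) (hst : st ≤ 11)
    (hne : ¬ (arr = 0 ∨ arr ≤ pyAtB aA st)) :
    suffixBest aA st arr =
      max (suffixBest aA (st + 1) arr)
        (suffixBest aA (st + 1) (arr - (pyAtB aA st + 1)) + (st : Int)) := by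
  rw [suffixBest_split aA st arr hst, Tm_map]
  have hcongr := Tm_congr
    (fun m => (simMask aA arr st (2 ^ (11 - st) + m)).1 = true)
    (fun m => (simMask aA (arr - (pyAtB aA st + 1)) (st + 1) m).1 = true)
    (fun m => (simMask aA arr st (2 ^ (11 - st) + m)).2.2)
    (fun m => (st : Int) + (simMask aA (arr - (pyAtB aA st + 1)) (st + 1) m).2.2)
    (List.range (2 ^ (11 - st)))
    (fun m hm => by
      dsimp only
      rw [simMask_high_good aA arr st m hst (List.mem_range.mp hm) hne]
      dsimp only
      exact ⟨Iff.rfl, by omega⟩)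
  rw [hcongr, Tm_off]
  have hin := Tm_init0
    (fun m => (simMask aA (arr - (pyAtB aA st + 1)) (st + 1) m).1 = true)
    (fun m => (simMask aA (arr - (pyAtB aA st + 1)) (st + 1) m).2.2)
    (List.range (2 ^ (11 - st)))
    (fun m _ => simMask_score_nonneg aA _ _ m)
    ⟨0, List.mem_range.mpr (Nat.pow_pos (by norm_num)), by simp only [simMask_zero]⟩
  rw [hin]
  have hsb : Tm (fun m => (simMask aA (arr - (pyAtB aA st + 1)) (st + 1) m).1 = true)
      (fun m => (simMask aA (arr - (pyAtB aA st + 1)) (st + 1) m).2.2) 0 (List.range (2 ^ (11 - st)))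
      = suffixBest aA (st + 1) (arr - (pyAtB aA st + 1)) := by
    rw [suffixBest_eq_Tm, show 12 - (st + 1) = 11 - st by omega]
  rw [hsb]
  omega

-- pyAtA and pyAtB are the same indexing helper
theorem pyAt_eq : pyAtA = pyAtB := rfl

-- suffixBest computes dp
theorem suffixBest_eq_dpA (aA : List Int) :
    ∀ (k st : Nat) (arr : Int) (fuel : Nat), st + k = 12 → k < fuel →
      suffixBest aA st arr = dpA aA fuel st arr := by
  intro k
  induction k with
  | zero =>
    intro st arr fuel hsum hfuel
    obtain ⟨f, rfl⟩ : ∃ f, fuel = f + 1 := ⟨fuel - 1, by omega⟩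
    have hst : st = 12 := by omega
    subst hst
    rw [suffixBest_twelve]
    simp [dpA]
  | succ k ih =>
    intro st arr fuel hsum hfuel
    obtain ⟨f, rfl⟩ : ∃ f, fuel = f + 1 := ⟨fuel - 1, by omega⟩
    have hst : st ≤ 11 := by omega
    by_cases h0 : arr = 0
    · subst h0
      have h12 : suffixBest aA st 0 = 0 := by
        rw [suffixBest_skip aA st 0 hst (Or.inl rfl)]
        rw [ih (st + 1) 0 f (by omega) (by omega)]
        obtain ⟨f', rfl⟩ : ∃ f', f = f' + 1 := ⟨f - 1, by omega⟩
        simp [dpA]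
      rw [h12]
      simp [dpA]
    · have hcond : ¬ ((st == 12 || arr == 0) = true) := by
        simp only [Bool.or_eq_true, beq_iff_eq]
        push_neg
        exact ⟨by omega, h0⟩
      rw [show dpA aA (f + 1) st arr = (if st == 12 || arr == 0 then 0 else
            let mS := dpA aA f (st + 1) arr
            if pyAtA aA st < arr then max mS (dpA aA f (st + 1) (arr - pyAtA aA st - 1) + (st : Int))
            else mS) from rfl]
      rw [if_neg hcond]
      rw [pyAt_eq]
      by_cases hlt : pyAtB aA st < arr
      · rw [if_pos hlt]
        rw [suffixBest_take aA st arr hst (by push_neg; exact ⟨h0, by omega⟩)]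
        rw [ih (st + 1) arr f (by omega) (by omega),
            ih (st + 1) (arr - (pyAtB aA st + 1)) f (by omega) (by omega),
            show arr - (pyAtB aA st + 1) = arr - pyAtB aA st - 1 by ring]
      · rw [if_neg hlt]
        rw [suffixBest_skip aA st arr hst (Or.inr (by omega))]
        exact ih (st + 1) arr f (by omega) (by omega)

theorem maximumBobPoints_eq_alt (numArrows : Int) (aliceArrows : List Int) :
    maximumBobPoints numArrows aliceArrows = maximumBobPoints_alt numArrows aliceArrows := by
  unfold maximumBobPoints maximumBobPoints_alt
  have hfold : (List.range 12).foldl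
      (fun (s : List Int × Int) ii =>
        if dpA aliceArrows 13 (ii + 1) s.2 < dpA aliceArrows 13 ii s.2 then
          (s.1.set ii (pyAtA aliceArrows ii + 1), s.2 - (pyAtA aliceArrows ii + 1))
        else s)
      (List.replicate 12 0, numArrows)
      = (List.range 12).foldl
      (fun (s : List Int × Int) ii =>
        if suffixBest aliceArrows (ii + 1) s.2 < suffixBest aliceArrows ii s.2 then
          (s.1.set ii (pyAtB aliceArrows ii + 1), s.2 - (pyAtB aliceArrows ii + 1))
        else s)
      (List.replicate 12 0, numArrows) := by
    refine List.foldl_ext _ _ _ (fun s ii hii => ?_)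
    have h12 : ii < 12 := List.mem_range.mp hii
    rw [← suffixBest_eq_dpA aliceArrows (11 - ii) (ii + 1) s.2 13 (by omega) (by omega),
        ← suffixBest_eq_dpA aliceArrows (12 - ii) ii s.2 13 (by omega) (by omega),
        pyAt_eq]
  rw [hfold]

-- ===== VERDICT (by name: the statement is the Claim_ definition above) =====
theorem maximumBobPoints_spec : Claim_equal_maximumBobPoints := by
  intro numArrows aliceArrows _ _
  exact maximumBobPoints_eq_alt numArrows aliceArrows
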